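-- pv_equiv track=rewrite | github.com/maximborodai/vk_ds_test_case_music_recsys | service_func/service_func.py | count_funtion
-- ===== SOURCE A (Python) =====
-- def count_funtion(x,zero):
--
--     if x != zero:
--         split_lis = ['|',',','/','\\',';','、']
--         sum = 0
--         for i in split_lis:
--             sum += x.count(i)
--         return sum + 1
--     else:
--         return 0
-- ===== SOURCE B (Python) =====
-- DELIMS = frozenset(['|', ',', '/', '\\', ';', '、'])
--
-- def count_funtion(x, zero):
--     if x == zero:
--         return 0
--     total = 0
--     for c in x:
--         if c in DELIMS:
--             total += 1
--     return total + 1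
-- ===== Notes on version B (the rewrite author's own statement) =====
-- stated objective: simpler
-- what changed: Replaces six separate x.count(d) scans (one per delimiter) with a single pass over x that counts characters belonging to a precomputed delimiter set.
import Mathlib
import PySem

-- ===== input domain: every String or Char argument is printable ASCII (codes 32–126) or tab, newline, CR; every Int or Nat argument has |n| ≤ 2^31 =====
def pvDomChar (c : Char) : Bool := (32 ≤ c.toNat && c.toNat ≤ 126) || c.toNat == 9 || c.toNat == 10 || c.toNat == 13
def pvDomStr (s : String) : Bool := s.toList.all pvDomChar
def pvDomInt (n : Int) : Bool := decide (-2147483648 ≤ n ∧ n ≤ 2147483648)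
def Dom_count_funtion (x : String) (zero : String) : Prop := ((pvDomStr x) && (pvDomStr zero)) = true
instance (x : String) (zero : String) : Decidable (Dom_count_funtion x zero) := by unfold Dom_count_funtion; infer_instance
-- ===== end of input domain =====

-- B replaces A's six separate per-delimiter count scans by one pass over x with a set-membership test (simpler decomposition, same result).

-- ===== PORT A =====
def count_funtion (x : String) (zero : String) : Int :=
  if x ≠ zero then
    let split_lis : List String := ["|", ",", "/", "\\", ";", "、"]
    let sum : Int := split_lis.foldl (fun s i => s + (PySem.Str.count x i : Int)) 0
    sum + 1
  else
    0

-- ===== PORT B =====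
def pvDELIMS : PySem.Set Char := PySem.Set.ofList ['|', ',', '/', '\\', ';', '、']

def count_funtion_alt (x : String) (zero : String) : Int :=
  if x = zero then 0
  else
    (x.toList.foldl (fun total c => if pvDELIMS.contains c then total + 1 else total) 0) + 1

-- ===== PRECONDITION & SPEC =====
def Spec_count_funtion (x : String) (zero : String) (out : Int) : Prop := out = count_funtion_alt x zero
instance (x : String) (zero : String) (out : Int) : Decidable (Spec_count_funtion x zero out) := by unfold Spec_count_funtion; infer_instance

-- ===== CLAIM (what is proved, stated in full; the proofs are below) =====
def Claim_equal_count_funtion : Prop := ∀ (x : String) (zero : String), Dom_count_funtion x zero → Spec_count_funtion x zero (count_funtion x zero)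

-- ===== LEMMAS AND PROOFS =====

-- Chars.count.go with enough fuel counts occurrences of a single character.
theorem count_go_single (c : Char) (l : List Char) (fuel acc : Nat) (h : l.length ≤ fuel) :
    PySem.Chars.count.go [c] fuel l acc = acc + l.count c := by
  induction l generalizing fuel acc with
  | nil =>
    cases fuel <;> simp [PySem.Chars.count.go]
  | cons a t ih =>
    cases fuel with
    | zero => simp at h
    | succ f =>
      simp only [List.length_cons, Nat.succ_le_succ_iff] at h
      by_cases hc : a = c
      · subst hc
        simp [PySem.Chars.count.go, List.isPrefixOf, ih _ _ h]
        omega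
      · simp [PySem.Chars.count.go, List.isPrefixOf, hc, ih _ _ h]
        exact fun e => hc e.symm

theorem count_single (l : List Char) (c : Char) :
    PySem.Chars.count l [c] = l.count c := by
  simp [PySem.Chars.count, count_go_single c l l.length 0 (le_refl _)]

theorem step_eq (c : Char) :
    ((if c = '|' then (1:Int) else 0) + (if c = ',' then 1 else 0) + (if c = '/' then 1 else 0)
      + (if c = '\\' then 1 else 0) + (if c = ';' then 1 else 0) + (if c = '、' then 1 else 0))
      = (if pvDELIMS.contains c then 1 else 0) := by
  have : pvDELIMS.contains c = (c ∈ ['|', ',', '/', '\\', ';', '、'] : Bool) := by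
    simp [pvDELIMS, PySem.Set.mem_ofList]
  rw [this]
  by_cases h1 : c = '|' <;> by_cases h2 : c = ',' <;> by_cases h3 : c = '/' <;>
    by_cases h4 : c = '\\' <;> by_cases h5 : c = ';' <;> by_cases h6 : c = '、' <;>
    subst_vars <;> simp_all

theorem sum_counts (l : List Char) :
    ((l.count '|' : Int) + l.count ',' + l.count '/' + l.count '\\' + l.count ';' + l.count '、')
      = ((l.countP (fun c => pvDELIMS.contains c) : Nat) : Int) := by
  induction l with
  | nil => simp
  | cons c t ih =>
    simp only [List.count_cons, List.countP_cons]
    push_cast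
    rw [← ih, ← step_eq c]
    by_cases h1 : c = '|' <;> by_cases h2 : c = ',' <;> by_cases h3 : c = '/' <;>
      by_cases h4 : c = '\\' <;> by_cases h5 : c = ';' <;> by_cases h6 : c = '、' <;>
      simp_all <;> omega

-- ===== VERDICT (by name: the statement is the Claim_ definition above) =====
theorem count_funtion_spec : Claim_equal_count_funtion := by
  intro x zero _
  unfold Spec_count_funtion count_funtion count_funtion_alt
  by_cases h : x = zero
  · simp [h]
  · simp only [h, ne_eq, not_false_eq_true, if_true, if_false]
    simp only [List.foldl, PySem.Str.count_eq]
    have e1 : ("|" : String).toList = ['|'] := by decide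
    have e2 : ("," : String).toList = [','] := by decide
    have e3 : ("/" : String).toList = ['/'] := by decide
    have e4 : ("\\" : String).toList = ['\\'] := by decide
    have e5 : (";" : String).toList = [';'] := by decide
    have e6 : ("、" : String).toList = ['、'] := by decide
    rw [e1, e2, e3, e4, e5, e6]
    simp only [count_single]
    rw [PySem.List.foldl_if_add_one]
    have := sum_counts x.toList
    have h2 : (fun c => pvDELIMS.contains c) = pvDELIMS.contains := rfl
    rw [h2] at this
    omega
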